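-- pv_equiv track=rewrite | github.com/fayfaywcl/AIJournal | imagetovideo.py | split_total_duration
-- ===== SOURCE A (Python) =====
-- def split_total_duration(total_duration: int, num_clips: int) -> list[int]:
--     if num_clips < 1:
--         return []
--
--     if total_duration < num_clips:
--         raise SystemExit(
--             f"--total-duration must be at least {num_clips} second(s) when generating {num_clips} clip(s)."
--         )
--
--     base_duration = total_duration // num_clips
--     remainder = total_duration % num_clips
--     durations = [base_duration] * num_clips
--
--     for index in range(remainder):
--         durations[index] += 1
--
--     return durations
-- ===== SOURCE B (Python) =====
-- def split_total_duration(total_duration: int, num_clips: int) -> list[int]: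
--     if num_clips < 1:
--         return []
--
--     if total_duration < num_clips:
--         raise SystemExit(
--             f"--total-duration must be at least {num_clips} second(s) when generating {num_clips} clip(s)."
--         )
--
--     result = []
--     remaining = total_duration
--     clips_left = num_clips
--     while clips_left > 0:
--         size = -(-remaining // clips_left)  # ceil(remaining / clips_left)
--         result.append(size)
--         remaining -= size
--         clips_left -= 1
--     return result
-- ===== Notes on version B (the rewrite author's own statement) =====
-- stated objective: alternative
-- what changed: Replaces the build-then-patch approach (replicate base value, then a second loop adding 1 to the first `remainder` entries) with a single greedy pass that repeatedly takes ceil(remaining/clips_left) and subtracts it.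
import Mathlib
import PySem

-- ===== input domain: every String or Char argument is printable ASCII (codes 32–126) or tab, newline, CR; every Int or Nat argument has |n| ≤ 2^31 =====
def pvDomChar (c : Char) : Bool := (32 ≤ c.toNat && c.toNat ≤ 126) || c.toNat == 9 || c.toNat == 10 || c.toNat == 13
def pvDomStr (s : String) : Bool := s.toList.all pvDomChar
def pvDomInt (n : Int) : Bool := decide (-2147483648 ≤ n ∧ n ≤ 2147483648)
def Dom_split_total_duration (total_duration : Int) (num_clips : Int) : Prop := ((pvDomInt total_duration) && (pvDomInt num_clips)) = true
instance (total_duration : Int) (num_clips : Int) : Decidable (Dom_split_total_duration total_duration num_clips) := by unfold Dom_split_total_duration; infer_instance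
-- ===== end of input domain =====

-- B replaces A's replicate-then-patch loops with one greedy pass taking ceil(remaining/clips_left); alternative decomposition, same cost.


-- ===== PORT A =====
-- Transliteration of A: base/remainder via Python floor-division, replicate, then
-- a for-loop over range(remainder) bumping durations[index] by 1.
-- (The SystemExit branch is excluded by Pre_ below.)
def split_total_duration (total_duration : Int) (num_clips : Int) : List Int :=
  if num_clips < 1 then []
  else
    let base_duration := PySem.Int.floordiv total_duration num_clips
    let remainder := PySem.Int.mod total_duration num_clips
    let durations := List.replicate num_clips.toNat base_duration
    (PySem.List.pyRange 0 remainder 1).foldl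
      (fun ds index => ds.modify index.toNat (· + 1)) durations

-- ===== PORT B =====
-- Greedy while-loop of Source B: while clips_left > 0, size = -(-remaining // clips_left).
def splitGreedy : Int → Nat → List Int
  | _, 0 => []
  | remaining, n + 1 =>
    let size := -(PySem.Int.floordiv (-remaining) ((n : Int) + 1))
    size :: splitGreedy (remaining - size) n

def split_total_duration_alt (total_duration : Int) (num_clips : Int) : List Int :=
  if num_clips < 1 then []
  else splitGreedy total_duration num_clips.toNat

-- ===== PRECONDITION & SPEC =====
-- Pre_ excludes exactly the inputs where A raises SystemExit (num_clips ≥ 1 and total_duration < num_clips).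
def Pre_split_total_duration (total_duration : Int) (num_clips : Int) : Prop :=
  num_clips < 1 ∨ num_clips ≤ total_duration
instance (total_duration : Int) (num_clips : Int) : Decidable (Pre_split_total_duration total_duration num_clips) := by unfold Pre_split_total_duration; infer_instance
def pvWitness_split_total_duration : Int × Int := (7, 3)

def Spec_split_total_duration (total_duration : Int) (num_clips : Int) (out : List Int) : Prop := out = split_total_duration_alt total_duration num_clips
instance (total_duration : Int) (num_clips : Int) (out : List Int) : Decidable (Spec_split_total_duration total_duration num_clips out) := by unfold Spec_split_total_duration; infer_instance

-- ===== CLAIM (what is proved, stated in full; the proofs are below) =====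
def Claim_equal_split_total_duration : Prop := ∀ (total_duration : Int) (num_clips : Int), Dom_split_total_duration total_duration num_clips → Pre_split_total_duration total_duration num_clips → Spec_split_total_duration total_duration num_clips (split_total_duration total_duration num_clips)

-- ===== LEMMAS AND PROOFS =====

-- One unfolding step of the greedy loop.
theorem splitGreedy_succ (remaining : Int) (n : Nat) :
    splitGreedy remaining (n + 1)
      = -(PySem.Int.floordiv (-remaining) ((n : Int) + 1))
        :: splitGreedy (remaining - -(PySem.Int.floordiv (-remaining) ((n : Int) + 1))) n := rfl

-- Modifying the element right after a prefix acts on the head of the suffix.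
theorem modify_append_length {l1 l2 : List Int} {x : Int} (f : Int → Int) :
    (l1 ++ x :: l2).modify l1.length f = l1 ++ f x :: l2 := by
  induction l1 with
  | nil => simp [List.modify]
  | cons a t ih =>
    show a :: (t ++ x :: l2).modify t.length f = _
    rw [ih]; rfl

-- Exact quotient: floor division of m*q + s by m is q when 0 ≤ s < m.
theorem fdiv_mul_add {m q s : Int} (hm : 0 < m) (hs0 : 0 ≤ s) (hsm : s < m) :
    PySem.Int.floordiv (m * q + s) m = q := by
  have h : PySem.Int.floordiv (m * q + s) m = (m * q + s) / m := by
    simp [PySem.Int.floordiv, Int.fdiv_eq_ediv]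
    omega
  rw [h, add_comm, Int.add_mul_ediv_left _ _ (by omega : m ≠ 0),
    Int.ediv_eq_zero_of_lt hs0 hsm, zero_add]

-- The size taken by a greedy step: base while nothing extra remains, base+1 otherwise.
theorem greedy_size {m : Int} (hm : 0 < m) (b r : Int) (h0 : 0 ≤ r) (hrm : r < m) :
    -(PySem.Int.floordiv (-(m * b + r)) m) = if r = 0 then b else b + 1 := by
  by_cases hr : r = 0
  · subst hr
    rw [show -(m * b + 0) = m * (-b) + 0 by ring, fdiv_mul_add hm le_rfl hm]
    simp
  · rw [show -(m * b + r) = m * (-b - 1) + (m - r) by ring,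
      fdiv_mul_add hm (by omega) (by omega)]
    simp [hr]; ring

-- The greedy loop on n*b + r clips front-loads the r extra seconds.
theorem splitGreedy_eq (n : Nat) (b : Int) (r : Nat) (hr : r < n) :
    splitGreedy ((n : Int) * b + (r : Int)) n
      = List.replicate r (b + 1) ++ List.replicate (n - r) b := by
  induction n generalizing b r with
  | zero => omega
  | succ n ih =>
    rw [splitGreedy_succ]
    have hm : (0:Int) < (n : Int) + 1 := by positivity
    have hsz := greedy_size hm b (r : Int) (by positivity) (by push_cast; omega)
    rw [show ((n+1 : Nat) : Int) = (n : Int) + 1 by push_cast; ring] at *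
    cases r with
    | zero =>
      rw [if_pos (by norm_num : ((0:Nat):Int) = 0)] at hsz
      rw [hsz]
      cases n with
      | zero => simp [splitGreedy]
      | succ m =>
        have h2 := ih b 0 (by omega)
        rw [show (((m+1:Nat):Int)+1) * b + ((0:Nat):Int) - b = ((m+1 : Nat) : Int) * b + ((0:Nat) : Int) by push_cast; ring, h2]
        simp [List.replicate_succ]
    | succ s =>
      have hne : ((s+1 : Nat) : Int) ≠ 0 := by positivity
      rw [if_neg hne] at hsz
      rw [hsz]
      have h2 := ih b s (by omega)
      rw [show ((n:Int)+1) * b + ((s+1:Nat):Int) - (b+1) = ((n:Nat) : Int) * b + ((s:Nat) : Int) by push_cast; ring, h2]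
      rw [show (n+1) - (s+1) = n - s by omega]
      simp [List.replicate_succ]

-- A's patch loop over range(r) turns the first r copies of b into b+1.
theorem foldl_modify_replicate (r n : Nat) (b : Int) (hrn : r ≤ n) :
    (PySem.List.pyRange 0 (r : Int) 1).foldl
        (fun ds index => ds.modify index.toNat (· + 1)) (List.replicate n b)
      = List.replicate r (b + 1) ++ List.replicate (n - r) b := by
  induction r with
  | zero => simp [PySem.List.pyRange]
  | succ s ih =>
    have hsplit : PySem.List.pyRange 0 ((s+1 : Nat) : Int) 1
        = PySem.List.pyRange 0 (s : Int) 1 ++ PySem.List.pyRange (s : Int) ((s+1 : Nat) : Int) 1 :=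
      PySem.List.pyRange_one_append _ _ _ (by positivity) (by push_cast; omega)
    have hone : PySem.List.pyRange (s : Int) ((s+1 : Nat) : Int) 1 = [(s : Int)] := by
      rw [show ((s+1 : Nat) : Int) = (s : Int) + 1 by push_cast; ring,
        PySem.List.pyRange_one_cons (by omega)]
      simp [PySem.List.pyRange]
    rw [hsplit, List.foldl_append, ih (by omega), hone]
    simp only [List.foldl]
    rw [show n - s = (n - (s+1)) + 1 by omega, List.replicate_succ,
      show ((s:Int).toNat) = (List.replicate s (b+1)).length by simp,
      modify_append_length]
    simp [List.replicate_succ']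

-- ===== VERDICT (by name: the statement is the Claim_ definition above) =====
theorem split_total_duration_spec : Claim_equal_split_total_duration := by
  intro t n _ hpre
  unfold Spec_split_total_duration split_total_duration split_total_duration_alt
  by_cases h : n < 1
  · simp [h]
  · simp only [h, if_false]
    have hn1 : 1 ≤ n := by omega
    have ht : n ≤ t := by rcases hpre with h' | h' <;> omega
    set b := PySem.Int.floordiv t n with hb
    set r := PySem.Int.mod t n with hrdef
    have hr0 : 0 ≤ r := by
      simp only [hrdef, PySem.Int.mod]
      exact Int.fmod_nonneg (by omega) (by omega)
    have hrn : r < n := by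
      simp only [hrdef, PySem.Int.mod]
      exact Int.fmod_lt_of_pos t (by omega)
    have htb : t = n * b + r := by
      simp only [hb, hrdef, PySem.Int.floordiv, PySem.Int.mod]
      linarith [Int.fmod_add_mul_fdiv t n]
    have hncast : ((n.toNat : Int)) = n := by omega
    have hrcast : ((r.toNat : Int)) = r := by omega
    have hg := splitGreedy_eq n.toNat b r.toNat (by omega)
    rw [hncast, hrcast, ← htb] at hg
    have hf := foldl_modify_replicate r.toNat n.toNat b (by omega)
    rw [hrcast] at hf
    rw [hf, hg]
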